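-- pv_equiv track=rewrite | github.com/lew1464313834-ctrl/DES | src/generate_cso_attacker/closed_loop_system_generator.py | generate_language_closed_loop_system
-- ===== SOURCE A (Python) =====
-- def generate_language_closed_loop_system(transition_closed_loop_system,
--                                      state_initial_closed_loop_system,
--                                      max_depth=8):
--     """
--     根据闭环转移字典生成语言。
--     transition_closed_loop_system 格式: {((s, o), 'event'): (ns, no), ...}
--     """
--
--     # 1. 结果集初始化（包含空迹）
--     language = {()}
--
--     # 2. 预处理转移字典，构建邻接表以提高搜索效率
--     # 结构: { curr_state: [(event, next_state), ...] }
--     adj_map = {}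
--     for key, next_state in transition_closed_loop_system.items():
--         # 你的键结构是 ((s, o), event)
--         if isinstance(key, tuple) and len(key) == 2:
--             curr_state, event = key
--             if curr_state not in adj_map:
--                 adj_map[curr_state] = []
--             adj_map[curr_state].append((event, next_state))
--
--     # 3. 规范化初始状态：确保它是可迭代的列表或集合
--     if isinstance(state_initial_closed_loop_system, tuple):
--         # 如果用户传的是 (0,0) 而不是 [(0,0)]
--         if isinstance(state_initial_closed_loop_system[0], int):
--             queue = [(state_initial_closed_loop_system, (), 0)]
--         else:
--             queue = [(s, (), 0) for s in state_initial_closed_loop_system]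
--     else:
--         queue = [(s, (), 0) for s in state_initial_closed_loop_system]
--
--     # 4. BFS 搜索路径
--     while queue:
--         curr_state, curr_path, depth = queue.pop(0)
--
--         if depth >= max_depth:
--             continue
--
--         if curr_state in adj_map:
--             for event, next_state in adj_map[curr_state]:
--                 # 过滤 'empty' 事件。如果 'empty' 代表自环，它不属于语言中的有效事件
--                 if event == 'empty':
--                     # 如果需要继续探索自环后的路径（但在你的数据中自环不改变状态），
--                     # 此处跳过即可，否则 depth 会被无效自环耗尽
--                     continue
--
--                 # 生成新路径
--                 new_path = curr_path + (event,)
--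
--                 # 记录路径
--                 language.add(new_path)
--
--                 # 状态空间搜索去重：(状态, 路径)
--                 # 只有新路径才继续搜索
--                 queue.append((next_state, new_path, depth + 1))
--
--     return language
-- ===== SOURCE B (Python) =====
-- def generate_language_closed_loop_system(transition_closed_loop_system,
--                                      state_initial_closed_loop_system,
--                                      max_depth=8):
--     """Iterative deepening instead of a BFS queue: for each depth d the event
--     sequences of exactly length d are enumerated by a recursive generator;
--     no queue/frontier/per-item depth bookkeeping at all."""
--     adj_map = {}
--     for key, next_state in transition_closed_loop_system.items():
--         if isinstance(key, tuple) and len(key) == 2: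
--             curr_state, event = key
--             adj_map.setdefault(curr_state, []).append((event, next_state))
--
--     if isinstance(state_initial_closed_loop_system, tuple):
--         if isinstance(state_initial_closed_loop_system[0], int):
--             starts = [state_initial_closed_loop_system]
--         else:
--             starts = list(state_initial_closed_loop_system)
--     else:
--         starts = list(state_initial_closed_loop_system)
--
--     def runs(state, d):
--         """All event tuples of exactly length d realizable from state."""
--         if d == 0:
--             yield ()
--             return
--         for event, next_state in adj_map.get(state, []):
--             if event == 'empty':
--                 continue
--             for rest in runs(next_state, d - 1):
--                 yield (event,) + rest
--
--     language = {()}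
--     for d in range(1, max_depth + 1):
--         found = False
--         for start in starts:
--             for path in runs(start, d):
--                 found = True
--                 language.add(path)
--         if not found:
--             break  # no run of length d => none of any greater length
--     return language
-- ===== Notes on version B (the rewrite author's own statement) =====
-- stated objective: alternative
-- what changed: Replaces the BFS queue of (state, path, depth) triples by iterative deepening: a recursive generator enumerates the event sequences of exactly length d from a state, the outer loop runs it for d = 1..max_depth and breaks as soon as a depth yields no run (every run's prefix is a run, so no longer runs exist); there is no queue, frontier or per-item depth counter, and paths are built by prepending the first event to recursively produced suffixes instead of appending to a carried prefix.
import Mathlib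
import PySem

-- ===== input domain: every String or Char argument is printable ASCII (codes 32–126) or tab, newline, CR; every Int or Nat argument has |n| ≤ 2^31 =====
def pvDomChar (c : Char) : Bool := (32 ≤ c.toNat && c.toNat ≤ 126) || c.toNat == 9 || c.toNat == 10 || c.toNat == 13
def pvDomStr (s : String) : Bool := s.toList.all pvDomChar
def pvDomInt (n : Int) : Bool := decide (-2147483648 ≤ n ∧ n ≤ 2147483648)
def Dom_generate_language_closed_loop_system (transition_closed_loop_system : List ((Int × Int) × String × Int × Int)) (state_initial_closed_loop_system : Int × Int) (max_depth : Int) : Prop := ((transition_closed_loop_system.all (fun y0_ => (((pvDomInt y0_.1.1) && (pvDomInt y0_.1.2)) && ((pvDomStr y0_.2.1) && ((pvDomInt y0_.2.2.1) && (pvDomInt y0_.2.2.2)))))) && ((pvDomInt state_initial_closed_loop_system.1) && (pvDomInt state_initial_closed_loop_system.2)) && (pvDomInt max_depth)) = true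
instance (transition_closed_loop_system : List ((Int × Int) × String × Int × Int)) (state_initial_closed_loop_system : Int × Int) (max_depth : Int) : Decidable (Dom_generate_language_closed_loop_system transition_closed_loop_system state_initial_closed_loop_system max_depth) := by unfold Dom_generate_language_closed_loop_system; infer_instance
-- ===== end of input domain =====

-- B replaces A's FIFO queue BFS by iterative deepening: a recursive enumeration of
-- the event sequences of exactly length d, run for d = 1..max_depth (same set).

-- queue item of A's BFS: (state, path, depth); (state, path) pair used by the proofs
abbrev pvQI : Type := (Int × Int) × List String × Int
abbrev pvEdge : Type := String × (Int × Int)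
abbrev pvAdj : Type := PySem.Dict (Int × Int) (List pvEdge)

-- shared by both ports (the adjacency-map build is kept verbatim in B):
-- for (curr,event),next in items: adj.setdefault(curr, []).append((event,next))
-- (the Python 'isinstance(key, tuple) and len(key) == 2' guard is always true under the typed signature)
def pvAdjMap (tr : List ((Int × Int) × String × Int × Int)) : pvAdj :=
  tr.foldl (fun adj kv => adj.insert kv.1 ((adj.getD kv.1 []) ++ [(kv.2.1, (kv.2.2.1, kv.2.2.2))]))
    PySem.Dict.empty

-- ===== PORT A =====
-- body of A's inner 'for event, next_state in adj_map[curr_state]' loop (adds to language, appends to queue)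
def pvBfsEdge (p : List String) (d : Int) (acc : PySem.Set (List String) × List pvQI) (e : pvEdge) :
    PySem.Set (List String) × List pvQI :=
  if e.1 = "empty" then acc
  else (PySem.Set.add acc.1 (p ++ [e.1]), acc.2 ++ [(e.2, p ++ [e.1], d + 1)])

def pvW (M : Nat) (md d : Int) : Nat := (M + 2) ^ (md - d).toNat
def pvQSum (M : Nat) (md : Int) (q : List pvQI) : Nat := (q.map (fun it => pvW M md it.2.2)).sum
def pvMaxE (adj : pvAdj) : Nat := (adj.values.map List.length).foldr Nat.max 0

-- termination bookkeeping for the literal port of A's 'while queue' loop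
theorem pv_le_foldr_max (x : Nat) (xs : List Nat) (h : x ∈ xs) : x ≤ xs.foldr Nat.max 0 := by
  induction xs with
  | nil => cases h
  | cons y ys ih =>
    rcases List.mem_cons.mp h with rfl | h'
    · exact Nat.le_max_left _ _
    · exact le_trans (ih h') (Nat.le_max_right _ _)

theorem pvMaxE_bound (adj : pvAdj) (s : Int × Int) (edges : List pvEdge)
    (h : adj.get? s = some edges) : edges.length ≤ pvMaxE adj := by
  have hmem : (s, edges) ∈ adj.items := PySem.Dict.mem_items_of_get?_eq_some adj h
  have hv : edges ∈ adj.values := by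
    simp only [PySem.Dict.values]
    exact List.mem_map.mpr ⟨(s, edges), hmem, rfl⟩
  exact pv_le_foldr_max _ _ (List.mem_map.mpr ⟨edges, hv, rfl⟩)

theorem pvFoldA_sum (M : Nat) (md : Int) (p : List String) (d : Int) :
    ∀ (edges : List pvEdge) (lang : PySem.Set (List String)) (q : List pvQI),
      pvQSum M md (edges.foldl (pvBfsEdge p d) (lang, q)).2
        ≤ pvQSum M md q + edges.length * pvW M md (d + 1) := by
  intro edges
  induction edges with
  | nil => intro lang q; simp [pvQSum]
  | cons e es ih =>
    intro lang q
    by_cases he : e.1 = "empty"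
    · simp only [List.foldl_cons, pvBfsEdge, he]
      calc pvQSum M md (es.foldl (pvBfsEdge p d) (lang, q)).2
          ≤ pvQSum M md q + es.length * pvW M md (d + 1) := ih lang q
        _ ≤ pvQSum M md q + (es.length + 1) * pvW M md (d + 1) := by
            have : es.length * pvW M md (d + 1) ≤ (es.length + 1) * pvW M md (d + 1) :=
              Nat.mul_le_mul_right _ (Nat.le_succ _)
            omega
        _ = pvQSum M md q + (e :: es).length * pvW M md (d + 1) := by simp
    · simp only [List.foldl_cons, pvBfsEdge, he]
      calc pvQSum M md (es.foldl (pvBfsEdge p d)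
              (PySem.Set.add lang (p ++ [e.1]), q ++ [(e.2, p ++ [e.1], d + 1)])).2
          ≤ pvQSum M md (q ++ [(e.2, p ++ [e.1], d + 1)]) + es.length * pvW M md (d + 1) := ih _ _
        _ = pvQSum M md q + pvW M md (d + 1) + es.length * pvW M md (d + 1) := by
            simp [pvQSum]
        _ = pvQSum M md q + (e :: es).length * pvW M md (d + 1) := by
            simp [List.length_cons]; ring

-- the two decrease facts for A's 'while queue' loop, cited by name by the recursion below
theorem pvBfs_dec_skip (M : Nat) (md : Int) (s : Int × Int) (p : List String) (d : Int)
    (rest : List pvQI) : pvQSum M md rest < pvQSum M md ((s, p, d) :: rest) := by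
  have : 0 < pvW M md d := Nat.pow_pos (by omega)
  simp only [pvQSum, List.map_cons, List.sum_cons]
  omega

theorem pvBfs_dec_step (adj : pvAdj) (md : Int) (s : Int × Int) (p : List String) (d : Int)
    (edges : List pvEdge) (lang : PySem.Set (List String)) (rest : List pvQI)
    (hadj : adj.get? s = some edges) (hd : ¬ md ≤ d) :
    pvQSum (pvMaxE adj) md (edges.foldl (pvBfsEdge p d) (lang, rest)).2
      < pvQSum (pvMaxE adj) md ((s, p, d) :: rest) := by
  have hE : edges.length ≤ pvMaxE adj := pvMaxE_bound adj s edges hadj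
  have hsum := pvFoldA_sum (pvMaxE adj) md p d edges lang rest
  have hk : (md - d).toNat = (md - (d + 1)).toNat + 1 := by omega
  have hpos : 0 < (pvMaxE adj + 2) ^ (md - (d + 1)).toNat := Nat.pow_pos (by omega)
  have hlt : edges.length * pvW (pvMaxE adj) md (d + 1) < pvW (pvMaxE adj) md d := by
    unfold pvW
    rw [hk, pow_succ, Nat.mul_comm ((pvMaxE adj + 2) ^ (md - (d + 1)).toNat) (pvMaxE adj + 2)]
    have h1 : edges.length * (pvMaxE adj + 2) ^ (md - (d + 1)).toNat
        ≤ pvMaxE adj * (pvMaxE adj + 2) ^ (md - (d + 1)).toNat :=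
      Nat.mul_le_mul_right _ hE
    have h2 : pvMaxE adj * (pvMaxE adj + 2) ^ (md - (d + 1)).toNat
        < (pvMaxE adj + 2) * (pvMaxE adj + 2) ^ (md - (d + 1)).toNat :=
      mul_lt_mul_of_pos_right (by omega) hpos
    exact lt_of_le_of_lt h1 h2
  have hq : pvQSum (pvMaxE adj) md ((s, p, d) :: rest)
      = pvW (pvMaxE adj) md d + pvQSum (pvMaxE adj) md rest := by
    simp [pvQSum]
  omega

-- A: BFS with a FIFO queue of (state, path, depth); pop, skip at depth >= max_depth,
-- otherwise extend along every non-'empty' edge, record the path, enqueue at depth+1.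
def pvBfs (adj : pvAdj) (md : Int) (queue : List pvQI) (language : PySem.Set (List String)) :
    PySem.Set (List String) :=
  match queue with
  | [] => language
  | (s, p, d) :: rest =>
    if md ≤ d then pvBfs adj md rest language
    else
      match hadj : adj.get? s with
      | none => pvBfs adj md rest language
      | some edges =>
        pvBfs adj md (edges.foldl (pvBfsEdge p d) (language, rest)).2
          (edges.foldl (pvBfsEdge p d) (language, rest)).1
termination_by pvQSum (pvMaxE adj) md queue
decreasing_by
  · exact pvBfs_dec_skip (pvMaxE adj) md s p d rest
  · exact pvBfs_dec_skip (pvMaxE adj) md s p d rest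
  · rename_i hd
    exact pvBfs_dec_step adj md s p d edges language rest hadj hd

def generate_language_closed_loop_system (transition_closed_loop_system : List ((Int × Int) × String × Int × Int)) (state_initial_closed_loop_system : Int × Int) (max_depth : Int) : List (List String) :=
  -- language = {()}; adj_map built from the dict's items
  let adj := pvAdjMap transition_closed_loop_system
  -- initial state is a pair of ints, so A's normalization takes the branch queue = [(state, (), 0)]
  pvBfs adj max_depth [(state_initial_closed_loop_system, ([], 0))]
    (PySem.Set.add PySem.Set.empty [])

-- ===== PORT B =====
-- runs(state, d): the event tuples of exactly length d from state, in adjacency order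
-- (the Python generator, materialized as the list of its yields in order)
def pvRuns (adj : pvAdj) : (Int × Int) → Nat → List (List String)
  | _, 0 => [[]]
  | s, d + 1 =>
    (adj.getD s []).foldl
      (fun acc e => if e.1 = "empty" then acc
        else acc ++ (pvRuns adj e.2 d).map (fun r => e.1 :: r)) []
termination_by _ d => d

-- the 'for d in range(1, max_depth+1): ... if not found: break' loop of B;
-- d ≥ 1 throughout, so d.toNat is exact.  found = (runs(start, d) nonempty); adding
-- the runs and then breaking on not found = returning lang when the run list is [].
def pvDeep (adj : pvAdj) (s : Int × Int) (md : Int) (d : Int)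
    (lang : PySem.Set (List String)) : PySem.Set (List String) :=
  if md + 1 ≤ d then lang
  else if pvRuns adj s d.toNat = [] then lang
  else pvDeep adj s md (d + 1) (PySem.Set.update lang (pvRuns adj s d.toNat))
termination_by (md + 1 - d).toNat
decreasing_by rename_i h _; omega

def generate_language_closed_loop_system_alt (transition_closed_loop_system : List ((Int × Int) × String × Int × Int)) (state_initial_closed_loop_system : Int × Int) (max_depth : Int) : List (List String) :=
  -- starts = [state] (pair of ints); language = {()}
  pvDeep (pvAdjMap transition_closed_loop_system) state_initial_closed_loop_system
    max_depth 1 (PySem.Set.add PySem.Set.empty [])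

-- ===== PRECONDITION & SPEC =====
def Spec_generate_language_closed_loop_system (transition_closed_loop_system : List ((Int × Int) × String × Int × Int)) (state_initial_closed_loop_system : Int × Int) (max_depth : Int) (out : List (List String)) : Prop := out = generate_language_closed_loop_system_alt transition_closed_loop_system state_initial_closed_loop_system max_depth
instance (transition_closed_loop_system : List ((Int × Int) × String × Int × Int)) (state_initial_closed_loop_system : Int × Int) (max_depth : Int) (out : List (List String)) : Decidable (Spec_generate_language_closed_loop_system transition_closed_loop_system state_initial_closed_loop_system max_depth out) := by unfold Spec_generate_language_closed_loop_system; infer_instance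

-- ===== CLAIM (what is proved, stated in full; the proofs are below) =====
def Claim_equal_generate_language_closed_loop_system : Prop := ∀ (transition_closed_loop_system : List ((Int × Int) × String × Int × Int)) (state_initial_closed_loop_system : Int × Int) (max_depth : Int), Dom_generate_language_closed_loop_system transition_closed_loop_system state_initial_closed_loop_system max_depth → Spec_generate_language_closed_loop_system transition_closed_loop_system state_initial_closed_loop_system max_depth (generate_language_closed_loop_system transition_closed_loop_system state_initial_closed_loop_system max_depth)

-- ===== LEMMAS AND PROOFS =====

-- ---- proof-only intermediate: A's BFS processed level by level ----

-- (state, path) frontier items used by the proofs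
abbrev pvFI : Type := (Int × Int) × List String

-- a frontier item tagged with its BFS depth
def pvTag (d : Int) (it : pvFI) : pvQI := (it.1, it.2, d)

def pvLvlEdge (p : List String) (acc : PySem.Set (List String) × List pvFI) (e : pvEdge) :
    PySem.Set (List String) × List pvFI :=
  if e.1 = "empty" then acc
  else (PySem.Set.add acc.1 (p ++ [e.1]), acc.2 ++ [(e.2, p ++ [e.1])])

def pvLvlStep (adj : pvAdj) (acc : PySem.Set (List String) × List pvFI) (it : pvFI) :
    PySem.Set (List String) × List pvFI :=
  (adj.getD it.1 []).foldl (pvLvlEdge it.2) acc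

def pvLevels (adj : pvAdj) (md : Int) (frontier : List pvFI)
    (language : PySem.Set (List String)) (depth : Int) : PySem.Set (List String) :=
  match frontier with
  | [] => language
  | _ :: _ =>
    if md ≤ depth then language
    else
      pvLevels adj md (frontier.foldl (pvLvlStep adj) (language, [])).2
        (frontier.foldl (pvLvlStep adj) (language, [])).1 (depth + 1)
termination_by (md - depth).toNat
decreasing_by rename_i h; omega

-- A's BFS ignores (and drains) a queue whose items are all at depth ≥ max_depth
theorem pvBfs_skip (adj : pvAdj) (md : Int) :
    ∀ (q : List pvQI) (lang : PySem.Set (List String)),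
      (∀ it ∈ q, md ≤ it.2.2) → pvBfs adj md q lang = lang := by
  intro q
  induction q with
  | nil => intro lang _; rw [pvBfs]
  | cons it rest ih =>
    intro lang h
    obtain ⟨s, p, d⟩ := it
    rw [pvBfs]
    simp only [if_pos (h _ List.mem_cons_self)]
    exact ih lang (fun x hx => h x (List.mem_cons_of_mem _ hx))

-- A's edge loop = the level edge loop, with the queue tail carried along and new items tagged d+1
theorem pvInner (p : List String) (d : Int) :
    ∀ (edges : List pvEdge) (lang : PySem.Set (List String)) (q : List pvQI) (nx : List pvFI),
      edges.foldl (pvBfsEdge p d) (lang, q ++ nx.map (pvTag (d + 1)))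
        = ((edges.foldl (pvLvlEdge p) (lang, nx)).1,
           q ++ (edges.foldl (pvLvlEdge p) (lang, nx)).2.map (pvTag (d + 1))) := by
  intro edges
  induction edges with
  | nil => intro lang q nx; simp
  | cons e es ih =>
    intro lang q nx
    by_cases he : e.1 = "empty"
    · simp only [List.foldl_cons, pvBfsEdge, pvLvlEdge, if_pos he]
      exact ih lang q nx
    · simp only [List.foldl_cons, pvBfsEdge, pvLvlEdge, if_neg he]
      have : (q ++ nx.map (pvTag (d + 1))) ++ [(e.2, p ++ [e.1], d + 1)]
          = q ++ (nx ++ [(e.2, p ++ [e.1])]).map (pvTag (d + 1)) := by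
        simp [pvTag]
      rw [this]
      exact ih _ q (nx ++ [(e.2, p ++ [e.1])])

-- processing one whole BFS level (queue = level-d items, then already-produced level-(d+1) items)
theorem pvLevelStep (adj : pvAdj) (md d : Int) (hd : ¬ md ≤ d) :
    ∀ (frontier pending : List pvFI) (lang : PySem.Set (List String)),
      pvBfs adj md (frontier.map (pvTag d) ++ pending.map (pvTag (d + 1))) lang
        = pvBfs adj md ((frontier.foldl (pvLvlStep adj) (lang, pending)).2.map (pvTag (d + 1)))
            (frontier.foldl (pvLvlStep adj) (lang, pending)).1 := by
  intro frontier
  induction frontier with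
  | nil => intro pending lang; simp
  | cons it fr ih =>
    intro pending lang
    obtain ⟨s, p⟩ := it
    simp only [List.map_cons, pvTag, List.cons_append]
    rw [pvBfs]
    simp only [if_neg hd]
    have hstep : ∀ acc, (((s, p) :: fr).foldl (pvLvlStep adj) acc)
        = fr.foldl (pvLvlStep adj) (pvLvlStep adj acc (s, p)) := by
      intro acc; simp [List.foldl_cons]
    split
    · rename_i hget
      have hgd : adj.getD s [] = [] := PySem.Dict.getD_of_get?_eq_none adj [] hget
      rw [hstep, pvLvlStep]
      simp only [hgd, List.foldl_nil]
      exact ih pending lang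
    · rename_i edges hget
      have hgd : adj.getD s [] = edges := PySem.Dict.getD_of_get?_eq_some adj [] hget
      rw [pvInner p d edges lang (fr.map (pvTag d)) pending]
      rw [hstep, pvLvlStep]
      simp only [hgd]
      exact ih _ _

-- main induction over levels: A's BFS from a single-depth queue = the level sweep
theorem pvMain (adj : pvAdj) (md : Int) :
    ∀ (n : Nat) (d : Int), (md - d).toNat = n →
      ∀ (frontier : List pvFI) (lang : PySem.Set (List String)),
        pvBfs adj md (frontier.map (pvTag d)) lang = pvLevels adj md frontier lang d := by
  intro n
  induction n with
  | zero =>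
    intro d hn frontier lang
    have hd : md ≤ d := by omega
    rw [pvBfs_skip adj md _ lang (by
      intro it hit
      rcases List.mem_map.mp hit with ⟨x, _, rfl⟩
      exact hd)]
    cases frontier with
    | nil => rw [pvLevels]
    | cons f fr => rw [pvLevels]; simp [if_pos hd]
  | succ m ih =>
    intro d hn frontier lang
    by_cases hd : md ≤ d
    · rw [pvBfs_skip adj md _ lang (by
        intro it hit
        rcases List.mem_map.mp hit with ⟨x, _, rfl⟩
        exact hd)]
      cases frontier with
      | nil => rw [pvLevels]
      | cons f fr => rw [pvLevels]; simp [if_pos hd]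
    · cases frontier with
      | nil => rw [pvLevels]; simp [pvBfs]
      | cons f fr =>
        have h1 : pvBfs adj md ((f :: fr).map (pvTag d) ++ ([] : List pvFI).map (pvTag (d + 1))) lang
            = pvBfs adj md (((f :: fr).foldl (pvLvlStep adj) (lang, [])).2.map (pvTag (d + 1)))
                ((f :: fr).foldl (pvLvlStep adj) (lang, [])).1 :=
          pvLevelStep adj md d hd (f :: fr) [] lang
        simp only [List.map_nil, List.append_nil] at h1
        rw [h1, ih (d + 1) (by omega)]
        rw [pvLevels]
        simp [if_neg hd]

-- ---- the level sweep = iterated frontier expansion; expansion = pvRuns ----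

def pvExpandIt (adj : pvAdj) (it : pvFI) : List pvFI :=
  (adj.getD it.1 []).flatMap (fun e => if e.1 = "empty" then [] else [(e.2, it.2 ++ [e.1])])

def pvExpand (adj : pvAdj) (fr : List pvFI) : List pvFI := fr.flatMap (pvExpandIt adj)

-- runs with end states, recursing on the FIRST event (mirrors pvRuns)
def pvRunsSt (adj : pvAdj) : (Int × Int) → Nat → List pvFI
  | s, 0 => [(s, [])]
  | s, d + 1 =>
    (adj.getD s []).flatMap (fun e => if e.1 = "empty" then []
      else (pvRunsSt adj e.2 d).map (fun it => (it.1, e.1 :: it.2)))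
termination_by _ d => d

-- the edge foldl of an accumulate-append loop, as init ++ flatMap
theorem pvFoldlIf {α β : Type} (c : α → Prop) [DecidablePred c] (h : α → List β) :
    ∀ (l : List α) (init : List β),
      l.foldl (fun acc e => if c e then acc else acc ++ h e) init
        = init ++ l.flatMap (fun e => if c e then [] else h e) := by
  intro l
  induction l with
  | nil => intro init; simp
  | cons e es ih =>
    intro init
    by_cases hc : c e <;> simp [hc, ih]

theorem pvRuns_eq (adj : pvAdj) :
    ∀ (d : Nat) (s : Int × Int), pvRuns adj s d = (pvRunsSt adj s d).map Prod.snd := by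
  intro d
  induction d with
  | zero => intro s; rw [pvRuns, pvRunsSt]; rfl
  | succ m ih =>
    intro s
    rw [pvRuns, pvRunsSt]
    rw [pvFoldlIf (fun e : pvEdge => e.1 = "empty") (fun e => (pvRuns adj e.2 m).map (fun r => e.1 :: r))]
    simp only [List.nil_append, List.map_flatMap]
    congr 1
    funext e
    by_cases hc : e.1 = "empty" <;> simp [hc, ih e.2, List.map_map, Function.comp]

-- expanding the length-d runs (under any path prefix p) gives the length-(d+1) runs
theorem pvExpand_runsSt (adj : pvAdj) :
    ∀ (d : Nat) (s : Int × Int) (p : List String),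
      pvExpand adj ((pvRunsSt adj s d).map (fun it => (it.1, p ++ it.2)))
        = (pvRunsSt adj s (d + 1)).map (fun it => (it.1, p ++ it.2)) := by
  intro d
  induction d with
  | zero =>
    intro s p
    rw [pvRunsSt, pvRunsSt]
    simp only [List.map_cons, List.map_nil, pvExpand, List.flatMap_cons, List.flatMap_nil,
      List.append_nil, pvExpandIt, List.map_flatMap]
    congr 1
    funext e
    by_cases hc : e.1 = "empty" <;> simp [hc, pvRunsSt]
  | succ m ih =>
    intro s p
    simp only [pvRunsSt]
    simp only [List.map_flatMap, pvExpand, List.flatMap_assoc]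
    congr 1
    funext e
    by_cases hc : e.1 = "empty"
    · simp [hc, pvExpandIt]
    · simp only [hc, if_false]
      have hcomp : ∀ (l : List pvFI),
          (l.map (fun it => (it.1, e.1 :: it.2))).map (fun it => (it.1, p ++ it.2))
            = l.map (fun it => (it.1, (p ++ [e.1]) ++ it.2)) := by
        intro l; simp [List.map_map, Function.comp_def, List.append_assoc]
      have h := ih e.2 (p ++ [e.1])
      simp only [pvExpand] at h
      rw [hcomp, h, ← hcomp]
      simp only [pvRunsSt]
      simp [List.map_flatMap, List.map_map]

theorem pvMap_nil_prefix (l : List pvFI) :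
    l.map (fun it => (it.1, ([] : List String) ++ it.2)) = l := by
  simp

theorem pvIter_runsSt (adj : pvAdj) (s : Int × Int) :
    ∀ (k : Nat), (pvExpand adj)^[k] [(s, [])] = pvRunsSt adj s k := by
  intro k
  induction k with
  | zero => simp [pvRunsSt]
  | succ m ih =>
    rw [Function.iterate_succ_apply', ih]
    have := pvExpand_runsSt adj m s []
    rw [pvMap_nil_prefix, pvMap_nil_prefix] at this
    exact this

-- one frontier sweep = Set.update with the expansion's paths, frontier := expansion
theorem pvEdgeFold_expand (p : List String) :
    ∀ (edges : List pvEdge) (lang : PySem.Set (List String)) (nx : List pvFI),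
      edges.foldl (pvLvlEdge p) (lang, nx)
        = (PySem.Set.update lang
             ((edges.flatMap (fun e => if e.1 = "empty" then [] else [(e.2, p ++ [e.1])])).map Prod.snd),
           nx ++ edges.flatMap (fun e => if e.1 = "empty" then [] else [(e.2, p ++ [e.1])])) := by
  intro edges
  induction edges with
  | nil => intro lang nx; simp [PySem.Set.update]
  | cons e es ih =>
    intro lang nx
    by_cases hc : e.1 = "empty"
    · simp only [List.foldl_cons, pvLvlEdge, List.flatMap_cons, hc]
      rw [ih]; simp
    · simp only [List.foldl_cons, pvLvlEdge, List.flatMap_cons, hc]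
      rw [ih]
      simp [PySem.Set.update]

theorem pvSweep_expand (adj : pvAdj) :
    ∀ (fr : List pvFI) (lang : PySem.Set (List String)) (nx : List pvFI),
      fr.foldl (pvLvlStep adj) (lang, nx)
        = (PySem.Set.update lang ((pvExpand adj fr).map Prod.snd), nx ++ pvExpand adj fr) := by
  intro fr
  induction fr with
  | nil => intro lang nx; simp [pvExpand, PySem.Set.update]
  | cons it fr' ih =>
    intro lang nx
    simp only [List.foldl_cons, pvLvlStep]
    rw [pvEdgeFold_expand it.2, ih]
    have hidn : pvExpandIt adj it
        = (adj.getD it.1 []).flatMap (fun e => if e.1 = "empty" then [] else [(e.2, it.2 ++ [e.1])]) := rfl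
    simp only [pvExpand, List.flatMap_cons, ← hidn, List.map_append, List.append_assoc]
    rw [PySem.Set.update, PySem.Set.update, PySem.Set.update, List.foldl_append]

theorem pvIter_nil (adj : pvAdj) : ∀ (k : Nat), (pvExpand adj)^[k] ([] : List pvFI) = [] := by
  intro k
  induction k with
  | zero => rfl
  | succ m ih => rw [Function.iterate_succ_apply]; simpa [pvExpand] using ih

-- pvLevels = fold of Set.update with the iterated expansions' paths
theorem pvLevels_fold (adj : pvAdj) (md : Int) :
    ∀ (n : Nat) (d : Int), (md - d).toNat = n →
      ∀ (fr : List pvFI) (lang : PySem.Set (List String)),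
        pvLevels adj md fr lang d
          = (List.range n).foldl
              (fun L k => PySem.Set.update L (((pvExpand adj)^[k + 1] fr).map Prod.snd)) lang := by
  intro n
  induction n with
  | zero =>
    intro d hn fr lang
    have hd : md ≤ d := by omega
    cases fr with
    | nil => rw [pvLevels]; simp
    | cons f fr' => rw [pvLevels]; simp [if_pos hd]
  | succ m ih =>
    intro d hn fr lang
    have hd : ¬ md ≤ d := by omega
    cases fr with
    | nil =>
      rw [pvLevels]
      have : ∀ (L : PySem.Set (List String)) (l : List Nat),
          l.foldl (fun L k => PySem.Set.update L
            (((pvExpand adj)^[k + 1] ([] : List pvFI)).map Prod.snd)) L = L := by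
        intro L l
        induction l generalizing L with
        | nil => rfl
        | cons a l' ihl =>
          simp only [List.foldl_cons, pvIter_nil adj (a + 1), List.map_nil]
          exact ihl _
      exact (this lang (List.range (m + 1))).symm
    | cons f fr' =>
      rw [pvLevels]
      simp only [if_neg hd]
      rw [pvSweep_expand adj (f :: fr') lang []]
      simp only [List.nil_append]
      rw [ih (d + 1) (by omega)]
      rw [List.range_succ_eq_map, List.foldl_cons, List.foldl_map]
      rw [Function.iterate_one]
      apply PySem.List.foldl_congr_mem
      intro L k _
      rw [← Function.iterate_succ_apply]

-- a run list once empty stays empty at every greater depth (a run's prefix is a run)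
theorem pvRuns_nil_succ (adj : pvAdj) :
    ∀ (d : Nat) (s : Int × Int), pvRuns adj s d = [] → pvRuns adj s (d + 1) = [] := by
  intro d
  induction d with
  | zero => intro s h; rw [pvRuns] at h; cases h
  | succ m ih =>
    intro s h
    rw [pvRuns,
      pvFoldlIf (fun e : pvEdge => e.1 = "empty") (fun e => (pvRuns adj e.2 m).map (fun r => e.1 :: r))] at h
    rw [pvRuns,
      pvFoldlIf (fun e : pvEdge => e.1 = "empty") (fun e => (pvRuns adj e.2 (m + 1)).map (fun r => e.1 :: r))]
    simp only [List.nil_append, List.flatMap_eq_nil_iff] at h ⊢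
    intro e he
    by_cases hc : e.1 = "empty"
    · simp [hc]
    · have := h e he
      simp only [if_neg hc, List.map_eq_nil_iff] at this ⊢
      exact ih e.2 this

theorem pvRuns_nil_ge (adj : pvAdj) (s : Int × Int) (d : Nat) (h : pvRuns adj s d = []) :
    ∀ (j : Nat), pvRuns adj s (d + j) = [] := by
  intro j
  induction j with
  | zero => exact h
  | succ m ih => exact pvRuns_nil_succ adj (d + m) s ih

theorem pvFold_update_nil (rs : Nat → List (List String)) :
    ∀ (l : List Nat) (lang : PySem.Set (List String)), (∀ k ∈ l, rs k = []) →
      l.foldl (fun L k => PySem.Set.update L (rs k)) lang = lang := by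
  intro l
  induction l with
  | nil => intro lang _; rfl
  | cons a l' ih =>
    intro lang h
    rw [List.foldl_cons, h a List.mem_cons_self]
    exact ih _ (fun k hk => h k (List.mem_cons_of_mem _ hk))

-- the deepening loop = the fold of updates over all remaining depths
theorem pvDeep_fold (adj : pvAdj) (s : Int × Int) (md : Int) :
    ∀ (n : Nat) (d : Int), 1 ≤ d → (md + 1 - d).toNat = n →
      ∀ (lang : PySem.Set (List String)),
        pvDeep adj s md d lang
          = (List.range n).foldl
              (fun L k => PySem.Set.update L (pvRuns adj s (d.toNat + k))) lang := by
  intro n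
  induction n with
  | zero =>
    intro d h1 hn lang
    have hd : md + 1 ≤ d := by omega
    rw [pvDeep, if_pos hd]
    simp
  | succ m ih =>
    intro d h1 hn lang
    have hd : ¬ md + 1 ≤ d := by omega
    rw [pvDeep]
    rw [if_neg hd]
    by_cases hrs : pvRuns adj s d.toNat = []
    · rw [if_pos hrs]
      symm
      apply pvFold_update_nil
      intro k _
      exact pvRuns_nil_ge adj s d.toNat hrs k
    · rw [if_neg hrs]
      rw [ih (d + 1) (by omega) (by omega)]
      rw [List.range_succ_eq_map, List.foldl_cons, List.foldl_map]
      have hdt : (d + 1).toNat = d.toNat + 1 := by omega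
      rw [Nat.add_zero]
      apply PySem.List.foldl_congr_mem
      intro L k _
      rw [hdt, show d.toNat + 1 + k = d.toNat + (k + 1) from by omega]

-- ===== VERDICT (by name: the statement is the Claim_ definition above) =====
theorem generate_language_closed_loop_system_spec : Claim_equal_generate_language_closed_loop_system := by
  intro tr init md _
  unfold Spec_generate_language_closed_loop_system
  unfold generate_language_closed_loop_system generate_language_closed_loop_system_alt
  have hA : pvBfs (pvAdjMap tr) md [(init, ([], 0))] (PySem.Set.add PySem.Set.empty [])
      = pvLevels (pvAdjMap tr) md [(init, [])] (PySem.Set.add PySem.Set.empty []) 0 := by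
    have := pvMain (pvAdjMap tr) md ((md - 0).toNat) 0 rfl [(init, [])]
      (PySem.Set.add PySem.Set.empty [])
    simpa [pvTag] using this
  rw [hA, pvLevels_fold (pvAdjMap tr) md ((md - 0).toNat) 0 rfl]
  rw [pvDeep_fold (pvAdjMap tr) init md ((md + 1 - 1).toNat) 1 (by omega) rfl]
  have hmd : ((md : Int) - 0).toNat = (md + 1 - 1).toNat := by omega
  rw [hmd]
  apply PySem.List.foldl_congr_mem
  intro L k _
  rw [pvRuns_eq, show (1 : Int).toNat + k = k + 1 from by omega,
    ← pvIter_runsSt (pvAdjMap tr) init (k + 1)]
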